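-- pv_equiv track=rewrite | github.com/rodescamps/torps-diversity | as_customer_cone.py | is_included
-- ===== SOURCE A (Python) =====
-- def is_included(range_start, range_end, reduced_customer_cone_prefixes):
--     for reduced_customer_cone_prefix in reduced_customer_cone_prefixes:
--         reduced_range_start_full, reduced_range_end_full = reduced_customer_cone_prefix.split(',')
--         reduced_range_start = [int(n) for n in reduced_range_start_full.split('.')]
--         reduced_range_end = [int(n) for n in reduced_range_end_full.split('.')]
--
--         if range_start[0] > reduced_range_start[0] and range_end[0] < reduced_range_end[0]:
--             return True
--         elif range_start[0] == reduced_range_start[0] and range_end[0] == reduced_range_end[0]: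
--             if range_start[1] > reduced_range_start[1] and range_end[1] < reduced_range_end[1]:
--                 return True
--             elif range_start[1] == reduced_range_start[1] and range_end[1] == reduced_range_end[1]:
--                 if range_start[2] > reduced_range_start[2] and range_end[2] < reduced_range_end[2]:
--                     return True
--                 elif range_start[2] == reduced_range_start[2] and range_end[2] == reduced_range_end[2]:
--                     if range_start[3] >= reduced_range_start[3] and range_end[3] <= reduced_range_end[3]:
--                         return True
--     return False
-- ===== SOURCE B (Python) =====
-- def _contained(quads):
--     s, e, cs, ce = quads[0]
--     if len(quads) == 1:
--         return s >= cs and e <= ce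
--     if s > cs and e < ce:
--         return True
--     if s == cs and e == ce:
--         return _contained(quads[1:])
--     return False
--
--
-- def _matches(range_start, range_end, prefix):
--     start_str, end_str = prefix.split(',')
--     cone_start = [int(n) for n in start_str.split('.')]
--     cone_end = [int(n) for n in end_str.split('.')]
--     quads = list(zip(range_start, range_end, cone_start, cone_end))[:4]
--     return _contained(quads)
--
--
-- def is_included(range_start, range_end, reduced_customer_cone_prefixes):
--     return any(_matches(range_start, range_end, p)
--                for p in reduced_customer_cone_prefixes)
-- ===== Notes on version B (the rewrite author's own statement) =====
-- stated objective: alternative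
-- what changed: B transposes the data: it zips the four octet lists into one list of (start,end,cone_start,cone_end) quadruples and decides containment by structural recursion on that list (strict at each head, inclusive at the last element), with any() over the prefixes, replacing A's 4-level nested if chain over fixed indices.
-- outside the precondition, e.g. on is_included([9, 0, 0, 0], [0, 0, 0, 0], ['1.2,8.9']): A returns True, B returns True; on is_included([2], [1], ['1.2.3.4,3.4.5.6']): A returns True, B returns True
import Mathlib
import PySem

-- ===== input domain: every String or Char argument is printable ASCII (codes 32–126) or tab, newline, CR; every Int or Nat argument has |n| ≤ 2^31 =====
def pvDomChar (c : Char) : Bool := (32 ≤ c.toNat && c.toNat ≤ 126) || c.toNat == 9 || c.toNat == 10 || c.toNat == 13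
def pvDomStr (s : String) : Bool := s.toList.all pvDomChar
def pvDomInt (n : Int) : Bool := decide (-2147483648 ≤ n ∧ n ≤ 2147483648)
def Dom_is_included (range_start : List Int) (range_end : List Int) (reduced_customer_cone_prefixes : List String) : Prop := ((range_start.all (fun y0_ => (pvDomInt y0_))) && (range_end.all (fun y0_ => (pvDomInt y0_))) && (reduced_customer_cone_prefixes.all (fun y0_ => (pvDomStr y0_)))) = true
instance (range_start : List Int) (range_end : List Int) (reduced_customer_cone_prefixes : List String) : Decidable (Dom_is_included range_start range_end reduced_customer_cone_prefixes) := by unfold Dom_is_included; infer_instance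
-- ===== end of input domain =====

-- B transposes the data into one list of octet quadruples (zip of the four lists, first 4) and
-- decides containment by structural recursion on that list (objective: alternative decomposition).

-- ===== PORT A =====
-- shared parsing: p.split(','), then int() on each '.'-separated octet (none = Python raises)
def pvInts : List String → Option (List Int)
  | [] => some []
  | t :: ts =>
    match PySem.Int.ofStr? t, pvInts ts with
    | some v, some vs => some (v :: vs)
    | _, _ => none

def pvParse (p : String) : Option (List Int × List Int) :=
  match (PySem.Str.split? p ",").getD [] with
  | [s, e] =>
    match pvInts ((PySem.Str.split? s ".").getD []),
          pvInts ((PySem.Str.split? e ".").getD []) with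
    | some crs, some cre => some (crs, cre)
    | _, _ => none
  | _ => none

-- xs[i]; the default 0 is only reached on an IndexError, i.e. outside Pre_
def pvGetI (xs : List Int) (i : Int) : Int := (PySem.List.pyGet? xs i).getD 0

-- A's nested-if body for one prefix
def pvCheckA (rs re crs cre : List Int) : Bool :=
  if pvGetI rs 0 > pvGetI crs 0 ∧ pvGetI re 0 < pvGetI cre 0 then true
  else if pvGetI rs 0 = pvGetI crs 0 ∧ pvGetI re 0 = pvGetI cre 0 then
    if pvGetI rs 1 > pvGetI crs 1 ∧ pvGetI re 1 < pvGetI cre 1 then true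
    else if pvGetI rs 1 = pvGetI crs 1 ∧ pvGetI re 1 = pvGetI cre 1 then
      if pvGetI rs 2 > pvGetI crs 2 ∧ pvGetI re 2 < pvGetI cre 2 then true
      else if pvGetI rs 2 = pvGetI crs 2 ∧ pvGetI re 2 = pvGetI cre 2 then
        if pvGetI rs 3 ≥ pvGetI crs 3 ∧ pvGetI re 3 ≤ pvGetI cre 3 then true else false
      else false
    else false
  else false

def is_included (range_start : List Int) (range_end : List Int) (reduced_customer_cone_prefixes : List String) : Bool :=
  match reduced_customer_cone_prefixes with
  | [] => false
  | p :: rest =>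
    match pvParse p with
    | none => false   -- Python raises here; outside Pre_
    | some (crs, cre) =>
      if pvCheckA range_start range_end crs cre then true
      else is_included range_start range_end rest

-- ===== PORT B =====
-- Source B's _contained: structural recursion on the quadruple list
-- ([] = Python IndexError on quads[0]; outside Pre_)
def pvContained : List (Int × Int × Int × Int) → Bool
  | [] => false
  | [(s, e, cs, ce)] => s ≥ cs && e ≤ ce
  | (s, e, cs, ce) :: q :: rest =>
    if s > cs ∧ e < ce then true
    else if s = cs ∧ e = ce then pvContained (q :: rest)
    else false

-- Source B's _matches: zip the four lists (Python zip truncates to the shortest) and take [:4]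
def pvMatches (rs re : List Int) (crs cre : List Int) : Bool :=
  pvContained ((rs.zip (re.zip (crs.zip cre))).take 4)

def is_included_alt (range_start : List Int) (range_end : List Int) (reduced_customer_cone_prefixes : List String) : Bool :=
  match reduced_customer_cone_prefixes with
  | [] => false
  | p :: rest =>   -- any(...) over the prefixes, short-circuit; none = Python raises, outside Pre_
    match pvParse p with
    | none => false
    | some (crs, cre) =>
      if pvMatches range_start range_end crs cre then true
      else is_included_alt range_start range_end rest

-- ===== PRECONDITION & SPEC =====
def pvQuadOk (s : String) : Bool :=
  (((PySem.Str.split? s ".").getD []).length ≥ 4 : Bool)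
    && ((PySem.Str.split? s ".").getD []).all (fun t => (PySem.Int.ofStr? t).isSome)

def pvPrefixOk (p : String) : Bool :=
  match (PySem.Str.split? p ",").getD [] with
  | [s, e] => pvQuadOk s && pvQuadOk e
  | _ => false

-- Pre_ excludes exactly the inputs where Python's parsing or indexing can raise: every prefix must
-- be "quad,quad" with ≥4 int-parseable octets per side and, when any prefix exists, both range
-- lists must have ≥4 entries; this also excludes some degenerate inputs on which A happens to
-- return early before hitting the missing octet/index (see cites).
def Pre_is_included (range_start : List Int) (range_end : List Int) (reduced_customer_cone_prefixes : List String) : Prop :=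
  (∀ p ∈ reduced_customer_cone_prefixes, pvPrefixOk p = true) ∧
  (reduced_customer_cone_prefixes ≠ [] → 4 ≤ range_start.length ∧ 4 ≤ range_end.length)
instance (range_start : List Int) (range_end : List Int) (reduced_customer_cone_prefixes : List String) : Decidable (Pre_is_included range_start range_end reduced_customer_cone_prefixes) := by unfold Pre_is_included; infer_instance

def pvWitness_is_included : List Int × List Int × List String :=
  ([1, 2, 3, 4], [1, 2, 3, 9], ["1.2.3.0,1.2.3.255"])

def Spec_is_included (range_start : List Int) (range_end : List Int) (reduced_customer_cone_prefixes : List String) (out : Bool) : Prop := out = is_included_alt range_start range_end reduced_customer_cone_prefixes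
instance (range_start : List Int) (range_end : List Int) (reduced_customer_cone_prefixes : List String) (out : Bool) : Decidable (Spec_is_included range_start range_end reduced_customer_cone_prefixes out) := by unfold Spec_is_included; infer_instance

-- ===== CLAIM (what is proved, stated in full; the proofs are below) =====
def Claim_equal_is_included : Prop := ∀ (range_start : List Int) (range_end : List Int) (reduced_customer_cone_prefixes : List String), Dom_is_included range_start range_end reduced_customer_cone_prefixes → Pre_is_included range_start range_end reduced_customer_cone_prefixes → Spec_is_included range_start range_end reduced_customer_cone_prefixes (is_included range_start range_end reduced_customer_cone_prefixes)

-- ===== LEMMAS AND PROOFS =====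

theorem pvGetI_c0 (a b c d : Int) (t : List Int) : pvGetI (a::b::c::d::t) 0 = a := by
  rw [pvGetI, PySem.List.pyGet?_of_nonneg _ (by norm_num : (0:Int) ≤ 0)]; simp

theorem pvGetI_c1 (a b c d : Int) (t : List Int) : pvGetI (a::b::c::d::t) 1 = b := by
  rw [pvGetI, PySem.List.pyGet?_of_nonneg _ (by norm_num : (0:Int) ≤ 1)]; simp

theorem pvGetI_c2 (a b c d : Int) (t : List Int) : pvGetI (a::b::c::d::t) 2 = c := by
  rw [pvGetI, PySem.List.pyGet?_of_nonneg _ (by norm_num : (0:Int) ≤ 2)]; simp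

theorem pvGetI_c3 (a b c d : Int) (t : List Int) : pvGetI (a::b::c::d::t) 3 = d := by
  rw [pvGetI, PySem.List.pyGet?_of_nonneg _ (by norm_num : (0:Int) ≤ 3)]; simp

theorem pvInts_length {ts : List String} {vs : List Int} (h : pvInts ts = some vs) :
    vs.length = ts.length := by
  induction ts generalizing vs with
  | nil => simp [pvInts] at h; simp [← h]
  | cons t ts ih =>
    unfold pvInts at h
    cases h1 : PySem.Int.ofStr? t <;> rw [h1] at h
    · simp at h
    · cases h2 : pvInts ts <;> rw [h2] at h
      · simp at h
      · simp only [Option.some.injEq] at h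
        subst h
        simp [ih h2]

theorem pvParse_lengths {p : String} {crs cre : List Int}
    (hok : pvPrefixOk p = true) (hp : pvParse p = some (crs, cre)) :
    4 ≤ crs.length ∧ 4 ≤ cre.length := by
  unfold pvPrefixOk at hok
  unfold pvParse at hp
  cases hsplit : (PySem.Str.split? p ",").getD [] with
  | nil => rw [hsplit] at hok; simp at hok
  | cons s rest =>
    cases rest with
    | nil => rw [hsplit] at hok; simp at hok
    | cons e rest2 =>
      cases rest2 with
      | cons _ _ => rw [hsplit] at hok; simp at hok
      | nil =>
        rw [hsplit] at hok hp
        simp only [Bool.and_eq_true] at hok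
        cases h1 : pvInts ((PySem.Str.split? s ".").getD []) with
        | none => simp [h1] at hp
        | some v1 =>
          cases h2 : pvInts ((PySem.Str.split? e ".").getD []) with
          | none => simp [h1, h2] at hp
          | some v2 =>
            simp only [h1, h2, Option.some.injEq, Prod.mk.injEq] at hp
            obtain ⟨hc1, hc2⟩ := hp
            subst hc1; subst hc2
            unfold pvQuadOk at hok
            constructor
            · rw [pvInts_length h1]
              have := hok.1
              simp only [Bool.and_eq_true, decide_eq_true_eq] at this
              exact this.1
            · rw [pvInts_length h2]
              have := hok.2
              simp only [Bool.and_eq_true, decide_eq_true_eq] at this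
              exact this.1

-- the per-prefix bodies agree whenever all four lists have at least 4 elements
theorem pvCheck_eq (rs re crs cre : List Int)
    (h1 : 4 ≤ rs.length) (h2 : 4 ≤ re.length) (h3 : 4 ≤ crs.length) (h4 : 4 ≤ cre.length) :
    pvCheckA rs re crs cre = pvMatches rs re crs cre := by
  rcases rs with _ | ⟨a0, rs⟩; · simp at h1
  rcases rs with _ | ⟨a1, rs⟩; · simp at h1
  rcases rs with _ | ⟨a2, rs⟩; · simp at h1
  rcases rs with _ | ⟨a3, rs⟩; · simp at h1
  rcases re with _ | ⟨b0, re⟩; · simp at h2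
  rcases re with _ | ⟨b1, re⟩; · simp at h2
  rcases re with _ | ⟨b2, re⟩; · simp at h2
  rcases re with _ | ⟨b3, re⟩; · simp at h2
  rcases crs with _ | ⟨c0, crs⟩; · simp at h3
  rcases crs with _ | ⟨c1, crs⟩; · simp at h3
  rcases crs with _ | ⟨c2, crs⟩; · simp at h3
  rcases crs with _ | ⟨c3, crs⟩; · simp at h3
  rcases cre with _ | ⟨d0, cre⟩; · simp at h4
  rcases cre with _ | ⟨d1, cre⟩; · simp at h4
  rcases cre with _ | ⟨d2, cre⟩; · simp at h4
  rcases cre with _ | ⟨d3, cre⟩; · simp at h4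
  simp only [pvCheckA, pvMatches, pvGetI_c0, pvGetI_c1, pvGetI_c2, pvGetI_c3,
    List.zip_cons_cons, List.take_succ_cons, List.take_zero, pvContained]
  split_ifs <;> simp_all

theorem is_included_eq_alt (rs re : List Int) (ps : List String)
    (hpre : Pre_is_included rs re ps) :
    is_included rs re ps = is_included_alt rs re ps := by
  induction ps with
  | nil => rfl
  | cons p rest ih =>
    obtain ⟨hall, hlen⟩ := hpre
    have hlens := hlen (by simp)
    unfold is_included is_included_alt
    cases hp : pvParse p with
    | none => rfl
    | some pair =>
      obtain ⟨crs, cre⟩ := pair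
      have hok := hall p (by simp)
      have hcl := pvParse_lengths hok hp
      have hrest : Pre_is_included rs re rest :=
        ⟨fun q hq => hall q (by simp [hq]), fun _ => hlens⟩
      simp only [pvCheck_eq rs re crs cre hlens.1 hlens.2 hcl.1 hcl.2, ih hrest]

-- ===== VERDICT (by name: the statement is the Claim_ definition above) =====
theorem is_included_spec : Claim_equal_is_included := by
  intro rs re ps _ hpre
  unfold Spec_is_included
  exact is_included_eq_alt rs re ps hpre
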